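-- pv_equiv track=rewrite | github.com/qcxia20/fpdb | fpdb.py | _next_resi_lines
-- ===== SOURCE A (Python) =====
-- def _next_resi_lines(lines):
--     resi_lines = list()
--     oldresindex = None
--     for line in lines:
--         if len(line)<6 or line[:6] not in ('ATOM  ','HETATM'):
--             continue
--         else:
--             resindex = line[22:26].strip()+line[21]
--             if resindex == oldresindex or oldresindex == None:
--                 resi_lines.append(line)
--             else:
--                 yield resi_lines
--                 resi_lines = list()
--                 resi_lines.append(line)
--         oldresindex = resindex
--     yield resi_lines
-- ===== SOURCE B (Python) =====
-- def _next_resi_lines(lines):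
--     # Two-phase: filter the record lines first, then chop the record list into
--     # consecutive runs of equal residue key by slicing off one chunk at a time.
--     records = [line for line in lines
--                if len(line) >= 6 and line[:6] in ('ATOM  ', 'HETATM')]
--     if not records:
--         yield []
--         return
--     while records:
--         key = records[0][22:26].strip() + records[0][21]
--         i = 1
--         while i < len(records) and records[i][22:26].strip() + records[i][21] == key:
--             i += 1
--         yield records[:i]
--         records = records[i:]
-- ===== Notes on version B (the rewrite author's own statement) =====
-- stated objective: alternative
-- what changed: Replaces A's single-pass state machine (current-group accumulator + previous-key variable, final unconditional yield) by a two-phase decomposition: filter out the ATOM/HETATM records first, then repeatedly slice off the leading run of records sharing the residue key (with A's single empty group reproduced when no line passes the filter).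
import Mathlib
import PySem

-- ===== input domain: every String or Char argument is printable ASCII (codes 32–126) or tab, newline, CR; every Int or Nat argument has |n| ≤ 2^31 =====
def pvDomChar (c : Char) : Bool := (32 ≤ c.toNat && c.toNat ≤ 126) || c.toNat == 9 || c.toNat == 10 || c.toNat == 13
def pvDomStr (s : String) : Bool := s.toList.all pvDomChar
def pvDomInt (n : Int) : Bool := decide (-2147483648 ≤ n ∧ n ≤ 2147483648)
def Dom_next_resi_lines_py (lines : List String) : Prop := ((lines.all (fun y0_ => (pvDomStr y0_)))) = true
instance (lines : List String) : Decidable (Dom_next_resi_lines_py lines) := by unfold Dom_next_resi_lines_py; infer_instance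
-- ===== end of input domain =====

-- B replaces A's single-pass state machine by filter-then-chunk slicing (alternative decomposition).


-- ===== PORT A =====
-- shared by both ports (both Pythons contain these exact expressions):
-- len(line)>=6 and line[:6] in ('ATOM  ','HETATM')
def pvIsRec (s : String) : Bool :=
  decide (6 ≤ s.toList.length) &&
    (PySem.List.slice s.toList none (some 6) == "ATOM  ".toList ||
     PySem.List.slice s.toList none (some 6) == "HETATM".toList)

-- line[22:26].strip() + line[21]; pyGet? = none is Python's IndexError, excluded by Pre_
def pvKey (s : String) : List Char :=
  PySem.Chars.strip (PySem.List.slice s.toList (some 22) (some 26)) ++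
    (match PySem.List.pyGet? s.toList 21 with
     | some c => [c]
     | none => [])

-- A's for-loop: state = (groups yielded so far, resi_lines, oldresindex)
def pvALoop : List String → List (List String) → List String → Option (List Char) → List (List String)
  | [], out, cur, _ => out ++ [cur]
  | l :: rest, out, cur, old =>
    if pvIsRec l then
      let k := pvKey l
      if some k = old ∨ old = none then pvALoop rest out (cur ++ [l]) (some k)
      else pvALoop rest (out ++ [cur]) [l] (some k)
    else pvALoop rest out cur old

def next_resi_lines_py (lines : List String) : List (List String) :=
  pvALoop lines [] [] none

-- ===== PORT B =====
-- Source B's outer while-loop: slice off the leading run of equal-key records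
def pvChunks : List String → List (List String)
  | [] => []
  | l :: rest =>
    (l :: rest.takeWhile (fun x => pvKey x == pvKey l)) ::
      pvChunks (rest.dropWhile (fun x => pvKey x == pvKey l))
  termination_by xs => xs.length
  decreasing_by
    simpa using Nat.lt_succ_of_le (List.length_dropWhile_le _ _)

def next_resi_lines_py_alt (lines : List String) : List (List String) :=
  match lines.filter pvIsRec with
  | [] => [[]]                      -- Source B: if not records: yield []
  | l :: rest => pvChunks (l :: rest)

-- ===== PRECONDITION & SPEC =====
-- A raises IndexError (line[21]) on any record line shorter than 22 chars; so does B. Excluded.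
def Pre_next_resi_lines_py (lines : List String) : Prop :=
  ∀ l ∈ lines, pvIsRec l = true → 22 ≤ l.toList.length
instance (lines : List String) : Decidable (Pre_next_resi_lines_py lines) := by
  unfold Pre_next_resi_lines_py; infer_instance

def pvWitness_next_resi_lines_py : List String := ["ATOM      1  N   ALA A   1"]

def Spec_next_resi_lines_py (lines : List String) (out : List (List String)) : Prop :=
  out = next_resi_lines_py_alt lines
instance (lines : List String) (out : List (List String)) : Decidable (Spec_next_resi_lines_py lines out) := by
  unfold Spec_next_resi_lines_py; infer_instance

-- ===== CLAIM =====
def Claim_equal_next_resi_lines_py : Prop := ∀ (lines : List String), Dom_next_resi_lines_py lines → Pre_next_resi_lines_py lines → Spec_next_resi_lines_py lines (next_resi_lines_py lines)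

-- ===== LEMMAS AND PROOFS =====

-- non-record lines are invisible to A's loop
theorem pvALoop_filter (xs : List String) : ∀ out cur old,
    pvALoop xs out cur old = pvALoop (xs.filter pvIsRec) out cur old := by
  induction xs with
  | nil => intro out cur old; rfl
  | cons l rest ih =>
    intro out cur old
    by_cases h : pvIsRec l = true
    · simp [pvALoop, h, ih]
    · simp [pvALoop, h, ih]

-- proof-side reading of A's loop once inside a group (all lines records, key known)
def pvCont : List String → List String → List Char → List (List String)
  | [], cur, _ => [cur]
  | l :: rest, cur, k =>
    if pvKey l == k then pvCont rest (cur ++ [l]) k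
    else cur :: pvCont rest [l] (pvKey l)

theorem pvALoop_cont (xs : List String) : ∀ out cur k, (∀ l ∈ xs, pvIsRec l = true) →
    pvALoop xs out cur (some k) = out ++ pvCont xs cur k := by
  induction xs with
  | nil => intro out cur k _; rfl
  | cons l rest ih =>
    intro out cur k hall
    have hl : pvIsRec l = true := hall l (by simp)
    have hrest : ∀ x ∈ rest, pvIsRec x = true := fun x hx => hall x (by simp [hx])
    by_cases hk : pvKey l = k
    · simp [pvALoop, hl, pvCont, hk, ih _ _ _ hrest]
    · have : ¬ (some (pvKey l) = some k ∨ (some k : Option (List Char)) = none) := by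
        simp [hk]
      simp only [pvALoop, hl, this]
      simp [pvCont, hk, ih _ _ _ hrest]

theorem pvCont_chunks (xs : List String) : ∀ cur k,
    pvCont xs cur k =
      (cur ++ xs.takeWhile (fun x => pvKey x == k)) ::
        pvChunks (xs.dropWhile (fun x => pvKey x == k)) := by
  induction xs with
  | nil => intro cur k; simp [pvCont, pvChunks]
  | cons l rest ih =>
    intro cur k
    by_cases hk : pvKey l = k
    · simp [pvCont, hk, ih]
    · simp [pvCont, hk, pvChunks, ih]

-- ===== VERDICT =====
theorem next_resi_lines_py_spec : Claim_equal_next_resi_lines_py := by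
  intro lines _ _
  unfold Spec_next_resi_lines_py next_resi_lines_py next_resi_lines_py_alt
  rw [pvALoop_filter]
  cases hlr : lines.filter pvIsRec with
  | nil => rfl
  | cons l rest =>
    have hall : ∀ x ∈ lines.filter pvIsRec, pvIsRec x = true := by
      intro x hx; exact (List.mem_filter.mp hx).2
    have hl : pvIsRec l = true := hall l (by simp [hlr])
    have hrest : ∀ x ∈ rest, pvIsRec x = true := fun x hx => hall x (by simp [hlr, hx])
    have step : pvALoop (l :: rest) [] [] none = pvALoop rest [] [l] (some (pvKey l)) := by
      simp [pvALoop, hl]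
    rw [step, pvALoop_cont rest _ _ _ hrest, pvCont_chunks]
    simp [pvChunks]
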